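-- pv_equiv track=rewrite | github.com/symaeng98/Algorithm | 이코테/알고리즘 유형별 기출문제(2회차)/구현/9번 (문자열 압축).py | cnt_word
-- ===== SOURCE A (Python) =====
-- def cnt_word(s, length):
--     arr = []
--     index = 0
--     result = 0
--     cnt = 0
--     word = s[:length]
--     while True:
--         if word == s[index:index+length]:
--             index += length
--             cnt += 1
--         else:
--             if cnt == 1:
--                 result += length
--             else:
--                 result += len(str(cnt)) + length
--             cnt = 0
--             word = s[index:index+length]
--
--         if index >= len(s):
--             if cnt == 1:
--                 result += len(word)
--             else:
--                 result += len(str(cnt)) + len(word)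
--             break
--
--     return result
-- ===== SOURCE B (Python) =====
-- def cnt_word(s, length):
--     # pass 1: materialize the chunk list
--     chunks = []
--     i = 0
--     while i < len(s):
--         chunks.append(s[i:i+length])
--         i += length
--     # pass 2: run-length group the chunk list
--     total = 0
--     while chunks:
--         head = chunks[0]
--         rest = chunks[1:]
--         run = 1
--         while rest and rest[0] == head:
--             run += 1
--             rest = rest[1:]
--         total += len(head) if run == 1 else len(str(run)) + len(head)
--         chunks = rest
--     return total
-- ===== Notes on version B (the rewrite author's own statement) =====
-- stated objective: alternative
-- what changed: A run-length encodes in one interleaved while-True loop that slices, counts and flushes with a break inside; B first materializes the list of chunks in one pass and then run-length groups that list with an inner scan per run.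
import Mathlib
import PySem

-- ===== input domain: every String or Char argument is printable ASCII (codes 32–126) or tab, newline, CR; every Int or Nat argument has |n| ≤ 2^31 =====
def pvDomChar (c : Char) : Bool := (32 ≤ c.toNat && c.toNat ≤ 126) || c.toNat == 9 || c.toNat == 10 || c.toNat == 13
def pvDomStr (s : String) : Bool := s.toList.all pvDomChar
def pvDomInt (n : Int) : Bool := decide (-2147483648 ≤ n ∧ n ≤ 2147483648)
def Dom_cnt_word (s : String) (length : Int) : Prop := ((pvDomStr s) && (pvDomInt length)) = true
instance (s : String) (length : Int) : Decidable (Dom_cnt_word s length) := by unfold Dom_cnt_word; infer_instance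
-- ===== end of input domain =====

-- B separates A's interleaved while-True loop into two passes — materialize the chunk list, then run-length group it — same cost, different decomposition; Pre_ excludes inputs on which A loops forever.


-- ===== PORT A =====
-- A's `while True` loop; fuel bounds the iteration count (2*len(s)+2 suffices under Pre_),
-- returning the running result on exhaustion (unreachable under Pre_).
def cntALoop (s : List Char) (length : Int) : Nat → Int → Int → Int → List Char → Int
  | 0, _index, result, _cnt, _word => result
  | fuel+1, index, result, cnt, word =>
    if word = PySem.List.slice s (some index) (some (index + length)) then
      -- matched: index += length; cnt += 1; then the break check
      if (s.length : Int) ≤ index + length then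
        if cnt + 1 = 1 then result + (word.length : Int)
        else result + ((PySem.Int.toChars (cnt + 1)).length : Int) + (word.length : Int)
      else cntALoop s length fuel (index + length) result (cnt + 1) word
    else
      -- mismatch: flush the run, reset cnt, reload word; then the break check
      let result' := if cnt = 1 then result + length
                     else result + ((PySem.Int.toChars cnt).length : Int) + length
      let word' := PySem.List.slice s (some index) (some (index + length))
      if (s.length : Int) ≤ index then
        if (0 : Int) = 1 then result' + (word'.length : Int)
        else result' + ((PySem.Int.toChars 0).length : Int) + (word'.length : Int)
      else cntALoop s length fuel index result' 0 word'

def cnt_word (s : String) (length : Int) : Int :=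
  cntALoop s.toList length (2 * s.toList.length + 2) 0 0 0
    (PySem.List.slice s.toList none (some length))

-- ===== PORT B =====
-- Source B pass 1: `while i < len(s): chunks.append(s[i:i+length]); i += length` (fuel len(s)+1 suffices under Pre_)
def cntChunksLoop (s : List Char) (length : Int) : Nat → Int → List (List Char) → List (List Char)
  | 0, _i, chunks => chunks
  | fuel+1, i, chunks =>
    if i < (s.length : Int) then
      cntChunksLoop s length fuel (i + length)
        (chunks ++ [PySem.List.slice s (some i) (some (i + length))])
    else chunks

-- Source B inner loop: `while rest and rest[0] == head: run += 1; rest = rest[1:]`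
def cntRunLoop (head : List Char) : List (List Char) → Int → Int × List (List Char)
  | [], run => (run, [])
  | h :: t, run => if h = head then cntRunLoop head t (run + 1) else (run, h :: t)

theorem cntRunLoop_snd_length_le (head : List Char) :
    ∀ (t : List (List Char)) (run : Int), (cntRunLoop head t run).2.length ≤ t.length := by
  intro t
  induction t with
  | nil => intro run; simp [cntRunLoop]
  | cons h t ih =>
    intro run
    by_cases hh : h = head
    · simpa [cntRunLoop, hh] using Nat.le_succ_of_le (ih (run + 1))
    · simp [cntRunLoop, hh]

-- Source B pass 2: `while chunks: …` (structural: the remaining chunk list shrinks every turn)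
def cntTotalLoop : List (List Char) → Int → Int
  | [], total => total
  | head :: rest, total =>
    let p := cntRunLoop head rest 1
    cntTotalLoop p.2
      (total + if p.1 = 1 then (head.length : Int)
             else ((PySem.Int.toChars p.1).length : Int) + (head.length : Int))
termination_by chunks => chunks.length
decreasing_by
  exact Nat.lt_succ_of_le (cntRunLoop_snd_length_le head rest 1)

def cnt_word_alt (s : String) (length : Int) : Int :=
  cntTotalLoop (cntChunksLoop s.toList length (s.toList.length + 1) 0 []) 0

-- ===== PRECONDITION & SPEC =====
-- Pre_ excludes exactly the inputs on which Python A never returns (length ≤ 0 with s nonempty,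
-- or length < 0 with s empty: the index never reaches len(s) and the while loop runs forever).
def Pre_cnt_word (s : String) (length : Int) : Prop := 1 ≤ length ∨ (s = "" ∧ 0 ≤ length)
instance (s : String) (length : Int) : Decidable (Pre_cnt_word s length) := by
  unfold Pre_cnt_word; infer_instance
def pvWitness_cnt_word : String × Int := ("aabbaccc", 2)

def Spec_cnt_word (s : String) (length : Int) (out : Int) : Prop := out = cnt_word_alt s length
instance (s : String) (length : Int) (out : Int) : Decidable (Spec_cnt_word s length out) := by
  unfold Spec_cnt_word; infer_instance

-- ===== CLAIM (what is proved, stated in full; the proofs are below) =====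
def Claim_equal_cnt_word : Prop := ∀ (s : String) (length : Int), Dom_cnt_word s length → Pre_cnt_word s length → Spec_cnt_word s length (cnt_word s length)

-- ===== LEMMAS AND PROOFS =====

-- the list of chunks s[0:len], s[len:2*len], …  (max len 1 = len whenever 1 ≤ len, the only case used)
def chunksOf (len : Nat) : List Char → List (List Char)
  | [] => []
  | h :: t => ((h :: t).take (max len 1)) :: chunksOf len ((h :: t).drop (max len 1))
termination_by l => l.length
decreasing_by simp only [List.length_drop, List.length_cons]; omega

-- contribution of one run of c copies of chunk w
def finRun (c : Int) (w : List Char) : Int :=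
  if c = 1 then (w.length : Int) else ((PySem.Int.toChars c).length : Int) + (w.length : Int)

-- run-length total of a chunk list, with a run of w already counted c times open
def scanRun (c : Int) (w : List Char) : List (List Char) → Int
  | [] => finRun c w
  | h :: t => if h = w then scanRun (c + 1) w t else finRun c w + scanRun 1 h t

theorem cntRunLoop_scan (w : List Char) :
    ∀ (t : List (List Char)) (c : Int),
      scanRun c w t =
        finRun (cntRunLoop w t c).1 w +
          (match (cntRunLoop w t c).2 with
           | [] => 0
           | h :: t' => scanRun 1 h t') := by
  intro t
  induction t with
  | nil => intro c; simp [cntRunLoop, scanRun]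
  | cons h t ih =>
    intro c
    by_cases hh : h = w
    · simpa [cntRunLoop, scanRun, hh] using ih (c + 1)
    · simp [cntRunLoop, scanRun, hh]

theorem cntTotalLoop_scan (cs : List (List Char)) (total : Int) :
      cntTotalLoop cs total =
        total + (match cs with | [] => 0 | h :: t => scanRun 1 h t) := by
  induction cs, total using cntTotalLoop.induct with
  | case1 total => simp [cntTotalLoop]
  | case2 head rest total p ih =>
    have hp : cntRunLoop head rest 1 = p := rfl
    have hm : (match head :: rest with | [] => (0 : Int) | h :: t => scanRun 1 h t)
        = scanRun 1 head rest := rfl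
    simp only [dite_eq_ite] at ih
    rw [cntTotalLoop, hp, ih, hm, cntRunLoop_scan head rest 1, hp]
    simp only [finRun]
    ring

theorem chunks_cons (L : List Char) (len : Nat) (hlen : 1 ≤ len) (i : Nat)
    (hi : i < L.length) :
    chunksOf len (L.drop i) = (L.drop i).take len :: chunksOf len (L.drop (i + len)) := by
  obtain ⟨x, t, hxt⟩ : ∃ x t, L.drop i = x :: t := by
    cases hdr : L.drop i with
    | nil => exact absurd (List.drop_eq_nil_iff.mp hdr) (by omega)
    | cons x t => exact ⟨x, t, rfl⟩
  rw [hxt, chunksOf, Nat.max_eq_left hlen, ← hxt, List.drop_drop]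

theorem chunks_build (L : List Char) (len : Nat) (hlen : 1 ≤ len) :
    ∀ (fuel i : Nat) (acc : List (List Char)),
      L.length - i + 1 ≤ fuel →
      cntChunksLoop L (len : Int) fuel (i : Int) acc = acc ++ chunksOf len (L.drop i) := by
  intro fuel
  induction fuel with
  | zero => intro i acc h; omega
  | succ fuel ih =>
    intro i acc h
    rw [cntChunksLoop]
    by_cases hi : i < L.length
    · have hcons := chunks_cons L len hlen i hi
      have hlt : (i : Int) < (L.length : Int) := by exact_mod_cast hi
      rw [if_pos hlt]
      have hcast : (i : Int) + (len : Int) = ((i + len : Nat) : Int) := by push_cast; ring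
      rw [PySem.List.slice_natCast_add, hcast]
      rw [ih (i + len) _ (by omega), hcons]
      simp
    · have hge : ¬ (i : Int) < (L.length : Int) := by exact_mod_cast hi
      rw [if_neg hge]
      have : L.drop i = [] := List.drop_eq_nil_iff.mpr (by omega)
      rw [this]
      simp [chunksOf]

theorem aloop_scan (L : List Char) (len : Nat) (hlen : 1 ≤ len) :
    ∀ (fuel : Nat) (i : Nat) (r c : Int) (w : List Char),
      i < L.length →
      ((c = 0 ∧ w = (L.drop i).take len) ∨ (1 ≤ c ∧ w.length = len)) →
      2 * (L.length - i) + (if c = 0 then 0 else 1) ≤ fuel →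
      cntALoop L (len : Int) fuel (i : Int) r c w = r + scanRun c w (chunksOf len (L.drop i)) := by
  intro fuel
  induction fuel with
  | zero => intro i r c w hi hinv hf; split at hf <;> omega
  | succ fuel ih =>
    intro i r c w hi hinv hf
    have hcast : (i : Int) + (len : Int) = ((i + len : Nat) : Int) := by push_cast; ring
    have hslice : PySem.List.slice L (some (i : Int)) (some ((i : Int) + (len : Int)))
        = (L.drop i).take len := PySem.List.slice_natCast_add L i len
    have hcons := chunks_cons L len hlen i hi
    rw [cntALoop, hslice, hcons]
    by_cases hw : w = (L.drop i).take len
    · rw [if_pos hw, scanRun, if_pos hw.symm]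
      by_cases hbr : L.length ≤ i + len
      · have hle : ((L.length : Int) ≤ (i : Int) + (len : Int)) := by
          rw [hcast]; exact_mod_cast hbr
        rw [if_pos hle, List.drop_eq_nil_iff.mpr hbr]
        simp only [chunksOf, scanRun, finRun]
        split_ifs <;> ring
      · have hgt : ¬ ((L.length : Int) ≤ (i : Int) + (len : Int)) := by
          rw [hcast]; exact_mod_cast hbr
        have hc0 : (0 : Int) ≤ c := by rcases hinv with ⟨h1, _⟩ | ⟨h1, _⟩ <;> omega
        have hwlen : w.length = len := by
          rcases hinv with ⟨_, h2⟩ | ⟨_, h2⟩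
          · rw [h2, List.length_take, List.length_drop]; omega
          · exact h2
        rw [if_neg hgt, hcast,
          ih (i + len) r (c + 1) w (by omega) (Or.inr ⟨by omega, hwlen⟩)
            (by rw [if_neg (by omega : ¬ (c + 1 = 0))]; split at hf <;> omega)]
    · rw [if_neg hw]
      obtain ⟨hc1, hwlen⟩ : (1 : Int) ≤ c ∧ w.length = len := by
        rcases hinv with ⟨_, h2⟩ | ⟨h1, h2⟩
        · exact absurd h2 hw
        · exact ⟨h1, h2⟩
      have hnlt : ¬ ((L.length : Int) ≤ (i : Int)) := by exact_mod_cast Nat.not_le.mpr hi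
      rw [if_neg hnlt,
        ih i _ 0 _ hi (Or.inl ⟨rfl, rfl⟩)
          (by rw [if_pos rfl]; split at hf <;> omega),
        hcons, scanRun, if_pos rfl, scanRun, if_neg (Ne.symm hw)]
      simp only [finRun, zero_add]
      rw [hwlen]
      split_ifs <;> ring

-- ===== VERDICT (by name: the statement is the Claim_ definition above) =====
theorem cnt_word_spec : Claim_equal_cnt_word := by
  intro s length hdom hpre
  unfold Spec_cnt_word
  by_cases hL : s.toList = []
  · have h0 : (0 : Int) ≤ length := by rcases hpre with h | ⟨_, h⟩ <;> omega
    simp [cnt_word, cnt_word_alt, hL, cntALoop, cntChunksLoop, cntTotalLoop, h0,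
      PySem.List.slice]
  · have hlen1 : (1 : Int) ≤ length := by
      rcases hpre with h | ⟨hs, _⟩
      · exact h
      · exact absurd (by rw [hs]; rfl) hL
    have hlc : ((length.toNat : Nat) : Int) = length := Int.toNat_of_nonneg (by omega)
    have hlen : 1 ≤ length.toNat := by omega
    have hn : 0 < s.toList.length := List.length_pos_iff.mpr hL
    have hw0 : PySem.List.slice s.toList none (some length)
        = (s.toList.drop 0).take length.toNat := by
      rw [List.drop_zero, ← hlc, PySem.List.slice_to_natCast]
      simp
      omega
    have ha := aloop_scan s.toList length.toNat hlen (2 * s.toList.length + 2) 0 0 0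
      ((s.toList.drop 0).take length.toNat) hn (Or.inl ⟨rfl, rfl⟩)
      (by rw [if_pos rfl]; omega)
    have hb := chunks_build s.toList length.toNat hlen (s.toList.length + 1) 0 []
      (by omega)
    rw [Nat.cast_zero] at ha hb
    rw [hlc] at ha hb
    unfold cnt_word cnt_word_alt
    rw [hw0, ha, hb, List.nil_append, cntTotalLoop_scan,
      chunks_cons s.toList length.toNat hlen 0 hn, scanRun, if_pos rfl]
    have hm : (match (s.toList.drop 0).take length.toNat ::
          chunksOf length.toNat (s.toList.drop (0 + length.toNat)) with
        | [] => (0 : Int)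
        | h :: t => scanRun 1 h t)
        = scanRun 1 ((s.toList.drop 0).take length.toNat)
            (chunksOf length.toNat (s.toList.drop (0 + length.toNat))) := rfl
    rw [hm]
    norm_num
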